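-- pv_equiv track=rewrite | github.com/BryanECR/-IPC2-Proyecto1 | IPC2_Proyecto1_201801155/Grafica.py | GraficarMatriz
-- ===== SOURCE A (Python) =====
-- def GraficarMatriz(nombre,filas,columnas,matriz):
--     cadena = ""
--     cadena += 'Nombre[label="'+nombre+'"]\n'
--     cadena += 'Filas[label= "n='+str(filas)+'"]\n'
--     cadena += 'Columnas[label= "m='+str(columnas)+'"]\n'
--
--     for f in range(len(matriz)):
--         for c in range(len(matriz[0])):
--             cadena += "Nodo"+str(f)+str(c)+'[label="'+str(matriz[f][c])+'"]\n'
--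
--     cadena += "Nombre -> Filas\n"
--     cadena += "Nombre -> Columnas\n"
--
--     fila = 0
--
--     while(fila < len(matriz)):
--         columna = 0
--         cadena += "Nombre -> Nodo"+str(fila)+str(columna)+"\n"
--         while(columna < len(matriz[0])-1):
--             cadena += "Nodo"+str(fila)+str(columna)+" -> Nodo"+str(fila)+str(columna+1)+"\n"
--             columna = columna +1
--         fila = fila+1
--
--     return cadena
-- ===== SOURCE B (Python) =====
-- def GraficarMatriz(nombre, filas, columnas, matriz):
--     # Single pass over the matrix maintaining two accumulators: node
--     # declarations and edge lines; the result is assembled once at the end.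
--     nodos = []
--     aristas = []
--     for f in range(len(matriz)):
--         aristas.append("Nombre -> Nodo" + str(f) + "0\n")
--         for c in range(len(matriz[0])):
--             nodos.append("Nodo" + str(f) + str(c) + '[label="' + str(matriz[f][c]) + '"]\n')
--             if c < len(matriz[0]) - 1:
--                 aristas.append("Nodo" + str(f) + str(c) + " -> Nodo" + str(f) + str(c + 1) + "\n")
--     return ('Nombre[label="' + nombre + '"]\n'
--             'Filas[label= "n=' + str(filas) + '"]\n'
--             'Columnas[label= "m=' + str(columnas) + '"]\n'
--             + "".join(nodos)
--             + "Nombre -> Filas\nNombre -> Columnas\n"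
--             + "".join(aristas))
-- ===== Notes on version B (the rewrite author's own statement) =====
-- stated objective: alternative
-- what changed: A appends into one growing string over three separate scans (a nested node loop plus two while-loops for edges); B does a single nested pass over the matrix maintaining two list accumulators (node declarations and edge lines, including the per-row 'Nombre -> Nodo{f}0' edge emitted once per row) and assembles the output by joining them once at the end.
import Mathlib
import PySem

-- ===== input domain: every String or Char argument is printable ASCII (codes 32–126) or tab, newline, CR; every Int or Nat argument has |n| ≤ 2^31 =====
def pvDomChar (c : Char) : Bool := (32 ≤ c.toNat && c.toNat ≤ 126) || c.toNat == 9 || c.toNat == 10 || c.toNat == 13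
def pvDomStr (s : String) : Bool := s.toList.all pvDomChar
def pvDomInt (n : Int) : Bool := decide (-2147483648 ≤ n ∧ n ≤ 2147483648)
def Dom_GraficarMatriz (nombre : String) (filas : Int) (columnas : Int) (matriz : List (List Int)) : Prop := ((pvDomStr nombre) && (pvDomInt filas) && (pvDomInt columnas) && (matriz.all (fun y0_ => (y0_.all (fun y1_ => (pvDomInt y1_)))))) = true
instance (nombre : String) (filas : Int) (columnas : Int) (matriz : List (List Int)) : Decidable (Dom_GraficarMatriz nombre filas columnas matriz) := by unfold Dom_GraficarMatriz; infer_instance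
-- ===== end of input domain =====

-- B builds the same graphviz text in ONE pass over the matrix, collecting node
-- declarations and edge lines in two list accumulators joined at the end
-- (objective: simpler single traversal instead of A's separate node loop and edge while-loops).

-- ===== PORT A =====
-- literal port of A's inner while loop (edge chain along one row);
-- matriz[f][c] is ported as pyGetD (total form of indexing): Pre_ keeps exactly the
-- inputs where Python's indexing is in range.
def pvAInner (fila : Int) (columna : Int) (lim : Int) (cadena : String) : String :=
  if _h : columna < lim then
    pvAInner fila (columna + 1) lim
      (cadena ++ ("Nodo" ++ PySem.Int.toStr fila ++ PySem.Int.toStr columna ++ " -> Nodo" ++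
        PySem.Int.toStr fila ++ PySem.Int.toStr (columna + 1) ++ "\n"))
  else cadena
termination_by (lim - columna).toNat
decreasing_by omega

-- literal port of A's outer while loop
def pvAOuter (matriz : List (List Int)) (fila : Int) (cadena : String) : String :=
  if _h : fila < PySem.List.len matriz then
    pvAOuter matriz (fila + 1)
      (pvAInner fila 0 (PySem.List.len (PySem.List.pyGetD matriz 0 []) - 1)
        (cadena ++ ("Nombre -> Nodo" ++ PySem.Int.toStr fila ++ PySem.Int.toStr 0 ++ "\n")))
  else cadena
termination_by (PySem.List.len matriz - fila).toNat
decreasing_by simp only [PySem.List.len_eq] at *; omega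

def GraficarMatriz (nombre : String) (filas : Int) (columnas : Int) (matriz : List (List Int)) : String :=
  let cadena : String := ""
  let cadena := cadena ++ ("Nombre[label=\"" ++ nombre ++ "\"]\n")
  let cadena := cadena ++ ("Filas[label= \"n=" ++ PySem.Int.toStr filas ++ "\"]\n")
  let cadena := cadena ++ ("Columnas[label= \"m=" ++ PySem.Int.toStr columnas ++ "\"]\n")
  let cadena := (PySem.List.pyRange 0 (PySem.List.len matriz) 1).foldl
    (fun acc f => (PySem.List.pyRange 0 (PySem.List.len (PySem.List.pyGetD matriz 0 [])) 1).foldl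
      (fun acc2 c => acc2 ++ ("Nodo" ++ PySem.Int.toStr f ++ PySem.Int.toStr c ++ "[label=\"" ++
        PySem.Int.toStr (PySem.List.pyGetD (PySem.List.pyGetD matriz f []) c 0) ++ "\"]\n")) acc) cadena
  let cadena := cadena ++ "Nombre -> Filas\n"
  let cadena := cadena ++ "Nombre -> Columnas\n"
  pvAOuter matriz 0 cadena

-- ===== PORT B =====
def GraficarMatriz_alt (nombre : String) (filas : Int) (columnas : Int) (matriz : List (List Int)) : String :=
  let p : List String × List String :=
    (PySem.List.pyRange 0 (PySem.List.len matriz) 1).foldl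
      (fun p f =>
        let p := (p.1, p.2 ++ ["Nombre -> Nodo" ++ PySem.Int.toStr f ++ "0\n"])
        (PySem.List.pyRange 0 (PySem.List.len (PySem.List.pyGetD matriz 0 [])) 1).foldl
          (fun q c =>
            (q.1 ++ ["Nodo" ++ PySem.Int.toStr f ++ PySem.Int.toStr c ++ "[label=\"" ++
               PySem.Int.toStr (PySem.List.pyGetD (PySem.List.pyGetD matriz f []) c 0) ++ "\"]\n"],
             q.2 ++ (if c < PySem.List.len (PySem.List.pyGetD matriz 0 []) - 1 then
               ["Nodo" ++ PySem.Int.toStr f ++ PySem.Int.toStr c ++ " -> Nodo" ++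
                 PySem.Int.toStr f ++ PySem.Int.toStr (c + 1) ++ "\n"] else []))) p)
      ([], [])
  "Nombre[label=\"" ++ nombre ++ "\"]\n" ++
    ("Filas[label= \"n=" ++ PySem.Int.toStr filas ++ "\"]\n") ++
    ("Columnas[label= \"m=" ++ PySem.Int.toStr columnas ++ "\"]\n") ++
    PySem.Str.join "" p.1 ++ "Nombre -> Filas\nNombre -> Columnas\n" ++ PySem.Str.join "" p.2

-- ===== PRECONDITION & SPEC =====
-- Pre_ excludes exactly the ragged matrices on which Python's matriz[f][c] raises
-- IndexError (a row shorter than the first row); A (and B) raise, so no value is claimed there.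
def Pre_GraficarMatriz (nombre : String) (filas : Int) (columnas : Int) (matriz : List (List Int)) : Prop :=
  ∀ row ∈ matriz, (matriz.headD []).length ≤ row.length

instance (nombre : String) (filas : Int) (columnas : Int) (matriz : List (List Int)) : Decidable (Pre_GraficarMatriz nombre filas columnas matriz) := by
  unfold Pre_GraficarMatriz; infer_instance

def pvWitness_GraficarMatriz : String × Int × Int × List (List Int) := ("mat", 2, 2, [[1, 2], [3, 4]])

def Spec_GraficarMatriz (nombre : String) (filas : Int) (columnas : Int) (matriz : List (List Int)) (out : String) : Prop := out = GraficarMatriz_alt nombre filas columnas matriz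
instance (nombre : String) (filas : Int) (columnas : Int) (matriz : List (List Int)) (out : String) : Decidable (Spec_GraficarMatriz nombre filas columnas matriz out) := by unfold Spec_GraficarMatriz; infer_instance

-- ===== CLAIM (what is proved, stated in full; the proofs are below) =====
def Claim_equal_GraficarMatriz : Prop := ∀ (nombre : String) (filas : Int) (columnas : Int) (matriz : List (List Int)), Dom_GraficarMatriz nombre filas columnas matriz → Pre_GraficarMatriz nombre filas columnas matriz → Spec_GraficarMatriz nombre filas columnas matriz (GraficarMatriz nombre filas columnas matriz)

-- ===== LEMMAS AND PROOFS =====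

theorem pvChars_join_cons (c : List Char) (r : List (List Char)) :
    PySem.Chars.join [] (c :: r) = c ++ PySem.Chars.join [] r := by
  cases r <;> simp [PySem.Chars.join_singleton, PySem.Chars.join_cons_cons, PySem.Chars.join_nil]

theorem pvSJ_nil : PySem.Str.join "" [] = "" := by simp [PySem.Str.join]

theorem pvSJ_cons (s : String) (l : List String) :
    PySem.Str.join "" (s :: l) = s ++ PySem.Str.join "" l := by
  simp only [PySem.Str.join]
  rw [show ("" : String).toList = [] from rfl]
  rw [List.map_cons, pvChars_join_cons, String.ofList_append, String.ofList_toList]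

theorem pvSJ_append (l m : List String) :
    PySem.Str.join "" (l ++ m) = PySem.Str.join "" l ++ PySem.Str.join "" m := by
  induction l with
  | nil => simp [pvSJ_nil]
  | cons h t ih => simp [pvSJ_cons, ih, String.append_assoc]

theorem pvSJ_flatMap {α : Type} (l : List α) (g : α → List String) :
    PySem.Str.join "" (l.flatMap g) =
      PySem.Str.join "" (l.map (fun x => PySem.Str.join "" (g x))) := by
  induction l with
  | nil => simp
  | cons h t ih => simp [List.flatMap_cons, pvSJ_append, pvSJ_cons, ih]

-- A's string loops: appending into an accumulator is the join of the emitted pieces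
theorem pvFoldl_str {α : Type} (l : List α) (g : α → String) (acc : String) :
    l.foldl (fun s x => s ++ g x) acc = acc ++ PySem.Str.join "" (l.map g) := by
  induction l generalizing acc with
  | nil => simp [pvSJ_nil]
  | cons h t ih => simp [List.foldl_cons, ih, pvSJ_cons, String.append_assoc]

-- B's loops: a fold appending to both components of a pair of accumulators
theorem pvFoldl_pair {α : Type} (l : List α) (g1 g2 : α → List String)
    (p : List String × List String) :
    l.foldl (fun q x => (q.1 ++ g1 x, q.2 ++ g2 x)) p = (p.1 ++ l.flatMap g1, p.2 ++ l.flatMap g2) := by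
  induction l generalizing p with
  | nil => simp
  | cons h t ih => simp [List.foldl_cons, ih]

theorem pvAInner_eq (f c lim : Int) (acc : String) :
    pvAInner f c lim acc = acc ++ PySem.Str.join "" ((PySem.List.pyRange c lim 1).map
      (fun c => "Nodo" ++ PySem.Int.toStr f ++ PySem.Int.toStr c ++ " -> Nodo" ++
        PySem.Int.toStr f ++ PySem.Int.toStr (c + 1) ++ "\n")) := by
  fun_induction pvAInner f c lim acc with
  | case1 c acc h ih =>
    rw [ih, PySem.List.pyRange_one_cons h, List.map_cons, pvSJ_cons, String.append_assoc]
  | case2 c acc h =>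
    rw [PySem.List.pyRange_one_eq_nil (by omega), List.map_nil, pvSJ_nil]
    simp

theorem pvAOuter_eq (matriz : List (List Int)) (fila : Int) (acc : String) :
    pvAOuter matriz fila acc = acc ++ PySem.Str.join ""
      ((PySem.List.pyRange fila (PySem.List.len matriz) 1).map (fun f =>
        ("Nombre -> Nodo" ++ PySem.Int.toStr f ++ PySem.Int.toStr 0 ++ "\n") ++
          PySem.Str.join "" ((PySem.List.pyRange 0 (PySem.List.len (PySem.List.pyGetD matriz 0 []) - 1) 1).map
            (fun c => "Nodo" ++ PySem.Int.toStr f ++ PySem.Int.toStr c ++ " -> Nodo" ++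
              PySem.Int.toStr f ++ PySem.Int.toStr (c + 1) ++ "\n")))) := by
  fun_induction pvAOuter matriz fila acc with
  | case1 fila acc h ih =>
    rw [ih, pvAInner_eq, PySem.List.pyRange_one_cons h, List.map_cons, pvSJ_cons]
    simp [String.append_assoc]
  | case2 fila acc h =>
    rw [PySem.List.pyRange_one_eq_nil (a := fila) (b := PySem.List.len matriz) (by omega),
      List.map_nil, pvSJ_nil]
    simp

theorem pvFlatMap_if_all {α β : Type} (l : List α) (p : α → Prop) [DecidablePred p]
    (g : α → β) (hall : ∀ x ∈ l, p x) :
    l.flatMap (fun x => if p x then [g x] else []) = l.map g := by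
  induction l with
  | nil => simp
  | cons h t ih =>
    simp only [List.flatMap_cons, List.map_cons, if_pos (hall h (by simp))]
    rw [ih (fun x hx => hall x (by simp [hx]))]
    simp

-- B's guarded edge emission over range(cols) is A's edge range over range(cols-1)
theorem pvIfEdges (n : Int) (g : Int → String) :
    (PySem.List.pyRange 0 n 1).flatMap (fun c => if c < n - 1 then [g c] else []) =
      (PySem.List.pyRange 0 (n - 1) 1).map g := by
  by_cases hn : n ≤ 0
  · rw [PySem.List.pyRange_one_eq_nil (by omega), PySem.List.pyRange_one_eq_nil (by omega)]
    simp
  · rw [PySem.List.pyRange_one_append 0 (n - 1) n (by omega) (by omega), List.flatMap_append]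
    have h1 : PySem.List.pyRange (n - 1) n 1 = [n - 1] := by
      have := PySem.List.pyRange_one_singleton (n - 1)
      rwa [show n - 1 + 1 = n by ring] at this
    rw [h1]
    rw [pvFlatMap_if_all _ (fun c => c < n - 1) g
      (fun x hx => ((PySem.List.mem_pyRange_one).mp hx).2)]
    simp

theorem pvRowEdge (f : Int) (s : String) :
    "Nombre -> Nodo" ++ (PySem.Int.toStr f ++ (PySem.Int.toStr 0 ++ ("\n" ++ s))) =
      "Nombre -> Nodo" ++ (PySem.Int.toStr f ++ ("0\n" ++ s)) := by
  rw [show PySem.Int.toStr 0 = "0" from rfl, ← String.append_assoc (s₁ := "0") (s₂ := "\n") (s₃ := s)]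
  rfl

-- ===== VERDICT (by name: the statement is the Claim_ definition above) =====
theorem GraficarMatriz_spec : Claim_equal_GraficarMatriz := by
  intro nombre filas columnas matriz _hdom _hpre
  show GraficarMatriz nombre filas columnas matriz = GraficarMatriz_alt nombre filas columnas matriz
  unfold GraficarMatriz GraficarMatriz_alt
  -- A side: both nested append-loops become joins
  simp only [pvFoldl_str]
  rw [pvAOuter_eq]
  -- B side: the pair fold becomes two flatMaps
  simp only [pvFoldl_pair]
  simp only [List.append_assoc]
  simp only [pvFoldl_pair]
  simp [pvSJ_flatMap, pvSJ_cons, pvSJ_nil, pvIfEdges, pvRowEdge, String.append_assoc]
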